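-- pv_equiv track=rewrite | github.com/KonstantinosAng/spring-boot-endpoint-crawler | search.py | parse_multiple_body_params
-- ===== SOURCE A (Python) =====
-- def parse_multiple_body_params(request_body_raw, target):
-- 	array = request_body_raw.split("\n")
-- 	if array[0].count(",") == 1:
-- 		format_pos = " ".join(x.strip() for x in array[:2]).strip()
-- 	else:
-- 		commas = 0
-- 		format_pos = ""
-- 		for x in array[0]:
-- 			if commas == 2: break
-- 			if x == ',': commas += 1
-- 			format_pos += x
-- 	return format_pos[:-1].replace(target, "").strip()
-- ===== SOURCE B (Python) =====
-- def parse_multiple_body_params(request_body_raw, target):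
--     lines = request_body_raw.split("\n")
--     first = lines[0]
--     commas = [i for i, c in enumerate(first) if c == ","]
--     if len(commas) == 1:
--         head = first.strip()
--         if len(lines) > 1:
--             format_pos = (head + " " + lines[1].strip()).strip()
--         else:
--             format_pos = head
--     elif len(commas) >= 2:
--         format_pos = first[:commas[1] + 1]
--     else:
--         format_pos = first
--     return format_pos[:-1].replace(target, "").strip()
-- ===== Notes on version B (the rewrite author's own statement) =====
-- stated objective: alternative
-- what changed: B precomputes the list of all comma positions of the first line with one enumerate comprehension and then branches on its length, slicing at the second recorded position, instead of A's stateful character loop with a comma counter; the two-line branch is rebuilt by explicit concatenation of the stripped lines instead of join over a slice.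
import Mathlib
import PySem

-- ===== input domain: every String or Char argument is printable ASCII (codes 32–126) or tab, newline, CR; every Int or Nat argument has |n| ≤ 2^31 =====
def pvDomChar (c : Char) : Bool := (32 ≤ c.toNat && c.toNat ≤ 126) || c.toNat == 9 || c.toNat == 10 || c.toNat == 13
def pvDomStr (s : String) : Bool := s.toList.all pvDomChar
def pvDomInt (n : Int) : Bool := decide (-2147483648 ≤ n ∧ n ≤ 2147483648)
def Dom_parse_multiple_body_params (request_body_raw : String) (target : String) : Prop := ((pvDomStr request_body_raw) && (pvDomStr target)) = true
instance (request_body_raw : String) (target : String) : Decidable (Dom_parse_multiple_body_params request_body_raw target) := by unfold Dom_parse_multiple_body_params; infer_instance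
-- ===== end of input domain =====

-- B precomputes the list of all comma positions of the first line with one enumerate
-- comprehension and branches on its length, slicing at the second recorded position,
-- instead of A's stateful character loop with a comma counter; objective: alternative.

-- ===== PORT A =====
-- the for-loop of A: 'commas' counter, break at 2, append each visited char
def pvScanA : Nat → List Char → List Char
  | _, [] => []
  | commas, c :: cs =>
      if commas == 2 then []
      else c :: pvScanA (if c == ',' then commas + 1 else commas) cs

def parse_multiple_body_params (request_body_raw : String) (target : String) : String :=
  let array : List String := (PySem.Str.split? request_body_raw "\n").getD []   -- sep ≠ "", split? is some
  let first : String := (PySem.List.pyGet? array 0).getD ""                      -- split's result is nonempty: index 0 never raises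
  let format_pos : String :=
    if PySem.Str.count first "," == 1 then
      PySem.Str.strip (PySem.Str.join " " ((PySem.List.slice array none (some 2)).map PySem.Str.strip))
    else
      String.ofList (pvScanA 0 first.toList)
  PySem.Str.strip (PySem.Str.replace (PySem.Str.slice format_pos none (some (-1))) target "")

-- ===== PORT B =====
def parse_multiple_body_params_alt (request_body_raw : String) (target : String) : String :=
  let lines : List String := (PySem.Str.split? request_body_raw "\n").getD []
  let first : String := (PySem.List.pyGet? lines 0).getD ""
  -- [i for i, c in enumerate(first) if c == ","]
  let commas : List Int :=
    (PySem.List.enumerate first.toList).filterMap (fun p => if p.2 == ',' then some p.1 else none)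
  let format_pos : String :=
    if commas.length == 1 then
      let head := PySem.Str.strip first
      match PySem.List.pyGet? lines 1 with            -- len(lines) > 1 test + lines[1]
      | some l2 => PySem.Str.strip (head ++ " " ++ PySem.Str.strip l2)
      | none => head
    else if h : 2 ≤ commas.length then
      PySem.Str.slice first none (some (commas[1] + 1))
    else first
  PySem.Str.strip (PySem.Str.replace (PySem.Str.slice format_pos none (some (-1))) target "")

-- ===== PRECONDITION & SPEC =====
def Spec_parse_multiple_body_params (request_body_raw : String) (target : String) (out : String) : Prop := out = parse_multiple_body_params_alt request_body_raw target
instance (request_body_raw : String) (target : String) (out : String) : Decidable (Spec_parse_multiple_body_params request_body_raw target out) := by unfold Spec_parse_multiple_body_params; infer_instance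

-- ===== CLAIM (what is proved, stated in full; the proofs are below) =====
def Claim_equal_parse_multiple_body_params : Prop := ∀ (request_body_raw : String) (target : String), Dom_parse_multiple_body_params request_body_raw target → Spec_parse_multiple_body_params request_body_raw target (parse_multiple_body_params request_body_raw target)

-- ===== LEMMAS AND PROOFS =====

-- abbreviation for B's comprehension, over an arbitrary enumerate start
def pvIdxs (cs : List Char) (s : Int) : List Int :=
  (PySem.List.enumerate cs s).filterMap (fun p => if p.2 == ',' then some p.1 else none)

theorem pvIdxs_cons (c : Char) (cs : List Char) (s : Int) :
    pvIdxs (c :: cs) s = (if c == ',' then [s] else []) ++ pvIdxs cs (s + 1) := by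
  simp only [pvIdxs, PySem.List.enumerate_cons, List.filterMap_cons]
  by_cases h : c = ',' <;> simp [h]

theorem pvIdxs_no_comma (cs : List Char) (s : Int) (h : ',' ∉ cs) : pvIdxs cs s = [] := by
  induction cs generalizing s with
  | nil => rfl
  | cons a t ih =>
    simp only [List.mem_cons, not_or] at h
    have ha : ¬ (a = ',') := fun hh => h.1 hh.symm
    simp [pvIdxs_cons, ha, ih (s + 1) h.2]

theorem pvIdxs_length (cs : List Char) (s : Int) : (pvIdxs cs s).length = cs.count ',' := by
  induction cs generalizing s with
  | nil => rfl
  | cons a t ih =>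
    by_cases h : a = ','
    · rw [pvIdxs_cons, if_pos (by simp [h]), List.length_append, ih (s + 1), h,
        List.count_cons_self]
      simp [Nat.add_comm]
    · rw [pvIdxs_cons, if_neg (by simp [h]), List.length_append, ih (s + 1),
        List.count_cons_of_ne h]
      simp

theorem pvIdxs_append (cs₁ cs₂ : List Char) (s : Int) :
    pvIdxs (cs₁ ++ cs₂) s = pvIdxs cs₁ s ++ pvIdxs cs₂ (s + cs₁.length) := by
  simp [pvIdxs, PySem.List.enumerate_append, List.filterMap_append]

-- Chars.count for a one-character needle is List.count
theorem pv_count_go (c : Char) (cs : List Char) (fuel acc : Nat) (h : cs.length ≤ fuel) :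
    PySem.Chars.count.go [c] fuel cs acc = acc + cs.count c := by
  induction cs generalizing fuel acc with
  | nil => cases fuel <;> simp [PySem.Chars.count.go]
  | cons a t ih =>
    cases fuel with
    | zero => simp at h
    | succ n =>
      have hn : t.length ≤ n := by simpa using h
      by_cases hac : c = a
      · subst hac
        simp only [PySem.Chars.count.go]
        rw [if_pos (by simp [List.isPrefixOf])]
        simp only [List.length_singleton, List.drop_succ_cons, List.drop_zero]
        rw [ih n (acc + 1) hn, List.count_cons_self]
        omega
      · simp only [PySem.Chars.count.go]
        rw [if_neg (by simp [List.isPrefixOf, hac])]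
        rw [ih n acc hn, List.count_cons_of_ne (fun hh => hac hh.symm)]

theorem pv_count_comma (cs : List Char) : PySem.Chars.count cs [','] = cs.count ',' := by
  unfold PySem.Chars.count
  simp only [List.isEmpty_cons, if_false, Bool.false_eq_true]
  rw [pv_count_go ',' cs cs.length 0 le_rfl, Nat.zero_add]

-- split a list at its first comma
theorem pv_split_first (cs : List Char) (h : ',' ∈ cs) :
    ∃ t rest, cs = t ++ ',' :: rest ∧ ',' ∉ t := by
  induction cs with
  | nil => simp at h
  | cons a t ih =>
    by_cases ha : a = ','
    · exact ⟨[], t, by simp [ha], by simp⟩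
    · have hm : ',' ∈ t := by
        rcases List.mem_cons.1 h with h1 | h1
        · exact absurd h1.symm ha
        · exact h1
      obtain ⟨u, rest, he, hu⟩ := ih hm
      exact ⟨a :: u, rest, by simp [he], by
        simp only [List.mem_cons, not_or]
        exact ⟨fun hh => ha hh.symm, hu⟩⟩

-- the scan loop passes over comma-free text unchanged (counter below 2)
theorem pv_scan_no_comma (k : Nat) (hk : k ≠ 2) (cs : List Char) (h : ',' ∉ cs) :
    pvScanA k cs = cs := by
  induction cs with
  | nil => rfl
  | cons a t ih =>
    simp only [List.mem_cons, not_or] at h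
    have ha : ¬ (a = ',') := fun hh => h.1 hh.symm
    simp [pvScanA, hk, ha, ih h.2]

-- pvScanA with counter 2 emits nothing
theorem pv_scan_two (cs : List Char) : pvScanA 2 cs = [] := by
  cases cs <;> rfl

-- the scan loop copies a comma-free block and the comma after it, bumping the counter
theorem pv_scan_split (k : Nat) (hk : k ≠ 2) (cs₁ cs₂ : List Char) (h : ',' ∉ cs₁) :
    pvScanA k (cs₁ ++ ',' :: cs₂) = cs₁ ++ ',' :: pvScanA (k + 1) cs₂ := by
  induction cs₁ with
  | nil => simp [pvScanA, hk]
  | cons a t ih =>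
    simp only [List.mem_cons, not_or] at h
    have ha : ¬ (a = ',') := fun hh => h.1 hh.symm
    simp [pvScanA, hk, ha, ih h.2]

-- strip is idempotent (needed because A strips the already-stripped single-line join)
theorem pv_dropWhile_idem (p : Char → Bool) (l : List Char) :
    List.dropWhile p (List.dropWhile p l) = List.dropWhile p l := by
  cases h : List.dropWhile p l with
  | nil => rfl
  | cons a t =>
    have := List.head_dropWhile_not p (l := l) (w := by simp [h])
    simp only [h, List.head_cons] at this
    simp [this]

theorem pv_dropWhile_prefix (p : Char → Bool) (x y : List Char)
    (hxy : x <+: y) (hy : List.dropWhile p y = y) : List.dropWhile p x = x := by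
  cases x with
  | nil => rfl
  | cons a t =>
    obtain ⟨u, hu⟩ := hxy
    have hhead : (a :: t ++ u) = y := hu
    have : ¬ p a = true := by
      rcases hy2 : y with _ | ⟨b, v⟩
      · simp [hy2] at hhead
      · have hb : a = b := by
          rw [hy2] at hhead
          exact (List.cons.injEq ..).mp (by simpa using hhead) |>.1
        rw [hy2] at hy
        subst hb
        intro hp
        simp [hp] at hy
        have hlen := congrArg List.length hy
        have hle := List.length_dropWhile_le p v
        simp at hlen
        omega
    simp [this]

theorem pv_strip_idem (x : List Char) :
    PySem.Chars.strip (PySem.Chars.strip x) = PySem.Chars.strip x := by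
  unfold PySem.Chars.strip PySem.Chars.rstrip PySem.Chars.lstrip
  set p := PySem.Chars.isspace
  set y := List.dropWhile p x with hy
  -- inner: r := (dropWhile p y.reverse).reverse, with dropWhile p y = y (idem)
  have hyidem : List.dropWhile p y = y := pv_dropWhile_idem p x
  set r := (List.dropWhile p y.reverse).reverse with hr
  have hrpre : r <+: y := by
    have hsuf : List.dropWhile p y.reverse <:+ y.reverse := List.dropWhile_suffix p
    have := List.reverse_prefix.2 (by simpa using hsuf)
    simpa [hr] using this
  have h1 : List.dropWhile p r = r := pv_dropWhile_prefix p r y hrpre hyidem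
  rw [h1]
  have h2 : List.dropWhile p r.reverse = List.dropWhile p (List.dropWhile p y.reverse) := by
    rw [hr]; rw [List.reverse_reverse]
  rw [h2, pv_dropWhile_idem]

-- B's one-comma branch equals A's join-over-slice branch
theorem pv_join_branch (array : List String) (first : String)
    (hfirst : first = (PySem.List.pyGet? array 0).getD "") :
    PySem.Str.strip (PySem.Str.join " " ((PySem.List.slice array none (some 2)).map PySem.Str.strip)) =
      (match PySem.List.pyGet? array 1 with
        | some l2 => PySem.Str.strip (PySem.Str.strip first ++ " " ++ PySem.Str.strip l2)
        | none => PySem.Str.strip first) := by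
  match array with
  | [] =>
    simp only [hfirst]
    have h2 : PySem.List.pyGet? ([] : List String) 1 = none := by
      simp [PySem.List.pyGet?, PySem.List.pyIdx?]
    rw [h2]
    rfl
  | [a] =>
    have h0 : (PySem.List.pyGet? [a] 0).getD "" = a := by
      simp [PySem.List.pyGet?, PySem.List.pyIdx?]
    have h1 : PySem.List.pyGet? [a] 1 = none := by
      simp [PySem.List.pyGet?, PySem.List.pyIdx?]
    rw [h1, hfirst, h0]
    have hsl : PySem.List.slice [a] none (some 2) = [a] := by
      rw [PySem.List.slice_to _ (by norm_num)]
      rfl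
    rw [hsl]
    have hj : PySem.Str.join " " [PySem.Str.strip a] = PySem.Str.strip a := by
      apply String.toList_inj.mp
      simp [PySem.Str.toList_join, PySem.Chars.join_singleton]
    simp only [List.map_cons, List.map_nil]
    rw [hj]
    apply String.toList_inj.mp
    simp only [PySem.Str.toList_strip]
    exact pv_strip_idem _
  | a :: b :: rest =>
    have h0 : (PySem.List.pyGet? (a :: b :: rest) 0).getD "" = a := by
      simp [PySem.List.pyGet?, PySem.List.pyIdx?,
        show (0 : Int) ≤ (rest.length : Int) + 1 by positivity]
    have h1 : PySem.List.pyGet? (a :: b :: rest) 1 = some b := by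
      simp [PySem.List.pyGet?, PySem.List.pyIdx?]
    rw [h1, hfirst, h0]
    have hsl : PySem.List.slice (a :: b :: rest) none (some 2) = [a, b] := by
      rw [PySem.List.slice_to _ (by norm_num)]
      rfl
    rw [hsl]
    have hj : PySem.Str.join " " [PySem.Str.strip a, PySem.Str.strip b] =
        PySem.Str.strip a ++ " " ++ PySem.Str.strip b := by
      apply String.toList_inj.mp
      simp [PySem.Str.toList_join, PySem.Chars.join_cons_cons, PySem.Chars.join_singleton]
    simp only [List.map_cons, List.map_nil]
    rw [hj]

-- core: on a first line whose comma count is ≠ 1, A's scan equals B's index-slice form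
theorem pv_scan_eq (first : String) (h : first.toList.count ',' ≠ 1) :
    String.ofList (pvScanA 0 first.toList) =
      (if (pvIdxs first.toList 0).length == 1 then
        PySem.Str.strip first     -- unreachable under h; value irrelevant
      else if h2 : 2 ≤ (pvIdxs first.toList 0).length then
        PySem.Str.slice first none (some ((pvIdxs first.toList 0)[1] + 1))
      else first) := by
  have hlen : (pvIdxs first.toList 0).length = first.toList.count ',' := pvIdxs_length _ _
  have hne1 : ¬ ((pvIdxs first.toList 0).length == 1) = true := by
    simp only [beq_iff_eq]; omega
  rw [if_neg hne1]
  by_cases hc : 2 ≤ first.toList.count ','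
  · -- at least two commas: decompose at the first two
    have hm : ',' ∈ first.toList := List.count_pos_iff.1 (by omega)
    obtain ⟨t₁, rest₁, he₁, h₁⟩ := pv_split_first first.toList hm
    have hcr : 1 ≤ rest₁.count ',' := by
      have := congrArg (List.count ',') he₁
      simp [List.count_append, List.count_eq_zero.2 h₁] at this
      omega
    obtain ⟨t₂, rest₂, he₂, h₂⟩ := pv_split_first rest₁ (List.count_pos_iff.1 (by omega))
    have hdec : first.toList = t₁ ++ ',' :: t₂ ++ ',' :: rest₂ := by
      rw [he₁, he₂]; simp
    obtain ⟨tail, hidx⟩ : ∃ tail, pvIdxs first.toList 0 =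
        ((0 : Int) + t₁.length) :: ((0 : Int) + t₁.length + ((t₂.length : Int) + 1)) :: tail := by
      rw [hdec]
      rw [show (t₁ ++ ',' :: t₂ ++ ',' :: rest₂ : List Char) = t₁ ++ ((',' :: t₂) ++ (',' :: rest₂)) by simp]
      rw [pvIdxs_append, pvIdxs_append, pvIdxs_no_comma t₁ _ h₁, pvIdxs_cons, pvIdxs_cons,
        pvIdxs_no_comma t₂ _ h₂]
      refine ⟨pvIdxs rest₂ ((0 : Int) + t₁.length + ((t₂.length : Int) + 1) + 1), ?_⟩
      simp only [beq_self_eq_true, if_true, List.nil_append, List.append_nil,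
        List.singleton_append, List.length_cons]
      push_cast
      ring_nf
    have hlen2 : 2 ≤ (pvIdxs first.toList 0).length := by rw [hidx]; simp
    rw [dif_pos hlen2]
    simp only [hidx, List.getElem_cons_succ, List.getElem_cons_zero]
    -- A side
    conv_lhs => rw [hdec]
    rw [show (t₁ ++ ',' :: t₂ ++ ',' :: rest₂ : List Char) = t₁ ++ ',' :: (t₂ ++ ',' :: rest₂) by simp]
    rw [pv_scan_split 0 (by decide) _ _ h₁, pv_scan_split 1 (by decide) _ _ h₂, pv_scan_two]
    -- B side: slice to index+1 is take over toList
    apply String.toList_inj.mp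
    rw [PySem.Str.toList_slice]
    have hcast : ((0 : Int) + t₁.length + ((t₂.length : Int) + 1) + 1) = ((t₁.length + 1 + t₂.length + 1 : Nat) : Int) := by
      push_cast; ring
    rw [hcast, PySem.Chars.slice_eq_listSlice, PySem.List.slice_to_natCast]
    rw [hdec]
    rw [show (t₁ ++ ',' :: t₂ ++ ',' :: rest₂ : List Char) = (t₁ ++ ',' :: t₂ ++ [',']) ++ rest₂ by simp]
    rw [List.take_append_of_le_length (by simp; omega)]
    rw [List.take_of_length_le (by simp; omega)]
    simp [String.toList_ofList]
  · -- no comma at all (count = 0 under h): scan copies everything, B keeps first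
    have hc0 : first.toList.count ',' = 0 := by omega
    have hno : ',' ∉ first.toList := List.count_eq_zero.1 hc0
    rw [dif_neg (by omega)]
    rw [pv_scan_no_comma 0 (by decide) _ hno, String.ofList_toList]

-- both format_pos computations agree, stated over plain ifs (the ports' lets are defeq to this)
theorem pv_format_eq (array : List String) (first : String) (commas : List Int)
    (hfirst : first = (PySem.List.pyGet? array 0).getD "")
    (hcommas : commas = pvIdxs first.toList 0) :
    (if PySem.Str.count first "," == 1 then
      PySem.Str.strip (PySem.Str.join " " ((PySem.List.slice array none (some 2)).map PySem.Str.strip))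
    else String.ofList (pvScanA 0 first.toList)) =
    (if commas.length == 1 then
      (match PySem.List.pyGet? array 1 with
        | some l2 => PySem.Str.strip (PySem.Str.strip first ++ " " ++ PySem.Str.strip l2)
        | none => PySem.Str.strip first)
    else if h : 2 ≤ commas.length then
      PySem.Str.slice first none (some (commas[1] + 1))
    else first) := by
  have hcount : PySem.Str.count first "," = first.toList.count ',' := by
    rw [PySem.Str.count_eq]; exact pv_count_comma first.toList
  by_cases h1 : first.toList.count ',' = 1
  · rw [if_pos (by simp [PySem.Str.count_eq, pv_count_comma, h1]),
      if_pos (by simp [hcommas, pvIdxs_length, h1])]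
    exact pv_join_branch array first hfirst
  · rw [if_neg (by simp [PySem.Str.count_eq, pv_count_comma, h1])]
    have hthis := pv_scan_eq first h1
    rw [if_neg (by simp [pvIdxs_length, h1])] at hthis
    rw [hthis, hcommas, if_neg (by simp [pvIdxs_length, h1])]

theorem pv_ports_eq (request_body_raw : String) (target : String) :
    parse_multiple_body_params request_body_raw target = parse_multiple_body_params_alt request_body_raw target := by
  unfold parse_multiple_body_params parse_multiple_body_params_alt
  exact congrArg
    (fun fp => PySem.Str.strip (PySem.Str.replace (PySem.Str.slice fp none (some (-1))) target ""))
    (pv_format_eq ((PySem.Str.split? request_body_raw "\n").getD [])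
      ((PySem.List.pyGet? ((PySem.Str.split? request_body_raw "\n").getD []) 0).getD "")
      (pvIdxs ((PySem.List.pyGet? ((PySem.Str.split? request_body_raw "\n").getD []) 0).getD "").toList 0)
      rfl rfl)

-- ===== VERDICT (by name: the statement is the Claim_ definition above) =====
theorem parse_multiple_body_params_spec : Claim_equal_parse_multiple_body_params := by
  intro r t _
  unfold Spec_parse_multiple_body_params
  exact pv_ports_eq r t
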